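-- pv_equiv track=rewrite | github.com/pypi-data/pypi-mirror-380 | packages/designer-dna/designer_dna-0.0.1-cp314-cp314t-manylinux_2_24_aarch64.manylinux_2_28_aarch64.whl/designer_dna/oligos.py | nrepeats_py
-- ===== SOURCE A (Python) =====
-- def nrepeats_py(sequence: str, n: int) -> int:
--     """Calculate the longest substring of n repeating characters.
--
--     Args:
--         sequence (str): Nucleotide string or Series of string
--         n (int): stretch of k-mer to observe
--
--     Returns:
--         (int) The longest run of repeating n-length characters.
--
--     Raises:
--         ValueError: when n < 1
--
--     Examples:
--         .. code-block:: python
--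
--             nrepeats_py("AAAA", 1) == 3  #  True
--             nrepeats_py("AAAA", 2) == 1  #  True
--             nrepeats_py("ACAACAACA", 3) == 2  #  True
--
--     """
--     max_val: int = 0
--     length: int = len(sequence)
--
--     for k in range(n):
--         previous: str = sequence[k : n + k]
--         current: int = 0
--         for j in range(n, length, n):
--             phase: str = sequence[j + k : j + k + n]
--             if phase == previous:
--                 current += 1
--                 if current > max_val:
--                     max_val = current
--             else:
--                 current = 0
--                 previous = phase
--
--     return max_val
-- ===== SOURCE B (Python) =====
-- def nrepeats_py(sequence: str, n: int) -> int:
--     """Longest run of equal consecutive n-length blocks, via a single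
--     character-comparison pass: a run of c equal blocks ending at position p
--     is exactly c*n consecutive positions i with sequence[i] == sequence[i+n]."""
--     if n < 1:
--         return 0
--     best = 0
--     run = 0
--     for i in range(len(sequence) - n):
--         if sequence[i] == sequence[i + n]:
--             run += 1
--             if run // n > best:
--                 best = run // n
--         else:
--             run = 0
--     return best
-- ===== Notes on version B (the rewrite author's own statement) =====
-- stated objective: faster
-- what changed: Replaces the nested loop over n phase offsets with slice comparisons (O(len*n)) by a single character-comparison pass: a run of c equal consecutive n-blocks ending at p is exactly c*n consecutive positions i with sequence[i]==sequence[i+n], so one running counter of such positions and its floor-division by n give the answer in O(len).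
import Mathlib
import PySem

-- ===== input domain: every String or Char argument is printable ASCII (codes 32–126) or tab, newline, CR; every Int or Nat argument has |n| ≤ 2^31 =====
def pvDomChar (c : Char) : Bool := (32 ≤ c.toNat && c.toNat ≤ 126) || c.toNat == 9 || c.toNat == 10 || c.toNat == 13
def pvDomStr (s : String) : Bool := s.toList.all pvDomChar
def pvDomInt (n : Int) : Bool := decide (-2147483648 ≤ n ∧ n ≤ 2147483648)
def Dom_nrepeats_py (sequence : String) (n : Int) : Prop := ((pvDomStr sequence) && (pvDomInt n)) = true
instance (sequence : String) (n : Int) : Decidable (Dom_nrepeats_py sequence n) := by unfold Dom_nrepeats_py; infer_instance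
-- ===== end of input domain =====

-- B replaces A's nested loop over n phase offsets (block-slice comparisons) by one
-- linear character-comparison pass with a running counter; objective: faster.

-- ===== PORT A =====
def nrepeats_py (sequence : String) (n : Int) : Int :=
  let length : Int := PySem.Str.len sequence
  (PySem.List.pyRange 0 n 1).foldl
    (fun max_val k =>
      ((PySem.List.pyRange n length n).foldl
        (fun (st : String × Int × Int) j =>
          let phase := PySem.Str.slice sequence (some (j + k)) (some (j + k + n))
          if phase = st.1 then
            let current := st.2.1 + 1
            (st.1, current, if current > st.2.2 then current else st.2.2)
          else (phase, 0, st.2.2))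
        (PySem.Str.slice sequence (some k) (some (n + k)), 0, max_val)).2.2)
    0

-- ===== PORT B =====
def nrepeats_py_alt (sequence : String) (n : Int) : Int :=
  if n < 1 then 0
  else
    ((PySem.List.pyRange 0 (PySem.Str.len sequence - n) 1).foldl
      (fun (st : Int × Int) i =>
        if PySem.Str.pyGet? sequence i = PySem.Str.pyGet? sequence (i + n) then
          let run := st.2 + 1
          (if PySem.Int.floordiv run n > st.1 then PySem.Int.floordiv run n else st.1, run)
        else (st.1, 0))
      (0, 0)).1

-- ===== PRECONDITION & SPEC =====
def Spec_nrepeats_py (sequence : String) (n : Int) (out : Int) : Prop := out = nrepeats_py_alt sequence n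
instance (sequence : String) (n : Int) (out : Int) : Decidable (Spec_nrepeats_py sequence n out) := by unfold Spec_nrepeats_py; infer_instance

-- ===== CLAIM (what is proved, stated in full; the proofs are below) =====
def Claim_equal_nrepeats_py : Prop := ∀ (sequence : String) (n : Int), Dom_nrepeats_py sequence n → Spec_nrepeats_py sequence n (nrepeats_py sequence n)

-- ===== LEMMAS AND PROOFS =====

-- the n-block of l starting at q (A's `sequence[q:q+n]`, as a char list)
def pvBlk (l : List Char) (N q : Nat) : List Char := (l.drop q).take N

-- B's running counter: length of the maximal run of positions i with l[i] == l[i+N] ending at p-1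
def pvRun (l : List Char) (N : Nat) : Nat → Nat
  | 0 => 0
  | p + 1 => if l[p]? = l[(p + N)]? then pvRun l N p + 1 else 0

-- B's accumulator: max over 1 ≤ p ≤ m of pvRun p / N
def pvBest (l : List Char) (N : Nat) : Nat → Nat
  | 0 => 0
  | m + 1 => max (pvBest l N m) (pvRun l N (m + 1) / N)

-- A's inner counter for offset k after t block steps
def pvChain (l : List Char) (N k : Nat) : Nat → Nat
  | 0 => 0
  | t + 1 => if pvBlk l N (N * (t + 1) + k) = pvBlk l N (N * t + k) then pvChain l N k t + 1 else 0

-- A's inner max over the first t block steps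
def pvAmax (l : List Char) (N k : Nat) : Nat → Nat
  | 0 => 0
  | t + 1 => max (pvAmax l N k t) (pvChain l N k (t + 1))

-- number of iterations of A's inner loop (length of range(n, len, n))
def pvT (l : List Char) (N : Nat) : Nat := if N < l.length then (l.length - 1) / N else 0

-- A's outer accumulator over offsets k < K
def pvOut (l : List Char) (N : Nat) : Nat → Nat
  | 0 => 0
  | k + 1 => max (pvOut l N k) (pvAmax l N (k) (pvT l N))

theorem pvRun_le (l : List Char) (N : Nat) : ∀ p, pvRun l N p ≤ p := by
  intro p; induction p with
  | zero => simp [pvRun]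
  | succ p ih => simp only [pvRun]; split <;> omega
theorem pvRun_add (l : List Char) (N q : Nat) :
    ∀ m, (∀ i, i < m → l[q + i]? = l[(q + i + N)]?) → pvRun l N (q + m) = pvRun l N q + m := by
  intro m; induction m with
  | zero => intro _; rfl
  | succ m ih =>
    intro h
    have h1 : q + (m + 1) = (q + m) + 1 := by omega
    rw [h1]; simp only [pvRun]
    rw [if_pos (h m (by omega)), ih (fun i hi => h i (by omega))]; omega
theorem pvRun_reset (l : List Char) (N q : Nat) (hq : l[q]? ≠ l[(q + N)]?) :
    ∀ p, q < p → pvRun l N p ≤ p - q - 1 := by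
  intro p; induction p with
  | zero => omega
  | succ p ih =>
    intro hp; simp only [pvRun]
    by_cases hqp : q = p
    · subst hqp; rw [if_neg hq]; omega
    · split
      · have := ih (by omega); omega
      · omega
theorem pvBlk_eq_iff (l : List Char) (N p q : Nat) :
    pvBlk l N p = pvBlk l N q ↔ ∀ i, i < N → l[q + i]? = l[p + i]? := by
  unfold pvBlk
  rw [List.ext_getElem?_iff]
  constructor
  · intro h i hi
    have := h i
    simp only [List.getElem?_take, List.getElem?_drop, if_pos hi] at this
    exact this.symm
  · intro h i
    simp only [List.getElem?_take, List.getElem?_drop]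
    split
    · exact (h i (by assumption)).symm
    · rfl

theorem pvChain_formula (l : List Char) (N k : Nat) (hN : 1 ≤ N) (hk : k < N) :
    ∀ t, N * t < l.length →
      pvChain l N k t = if N * t + k + N ≤ l.length then pvRun l N (N * t + k) / N else 0 := by
  intro t; induction t with
  | zero =>
    intro _
    have h0 : pvRun l N k / N = 0 :=
      Nat.div_eq_of_lt (lt_of_le_of_lt (pvRun_le l N k) hk)
    simp only [pvChain]; split <;> simp [h0]
  | succ t ih =>
    intro hL
    have hq : N * t < l.length := by nlinarith
    have hqp : N * (t + 1) + k = (N * t + k) + N := by ring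
    by_cases hfit : N * (t + 1) + k + N ≤ l.length
    · rw [if_pos hfit]
      have hcond : N * t + k + N ≤ l.length := by omega
      by_cases hb : pvBlk l N (N * (t + 1) + k) = pvBlk l N (N * t + k)
      · simp only [pvChain, if_pos hb]
        rw [ih hq, if_pos hcond]
        have hall := (pvBlk_eq_iff l N (N * (t + 1) + k) (N * t + k)).1 hb
        have hadd : pvRun l N ((N * t + k) + N) = pvRun l N (N * t + k) + N := by
          apply pvRun_add
          intro i hi
          have := hall i hi
          rw [hqp] at this
          have hidx : N * t + k + N + i = N * t + k + i + N := by omega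
          rw [hidx] at this
          exact this
        rw [hqp, hadd, Nat.add_div_right _ (by omega)]
      · simp only [pvChain, if_neg hb]
        have hex : ∃ i, i < N ∧ l[(N * t + k) + i]? ≠ l[(N * (t + 1) + k) + i]? := by
          by_contra hc
          push Not at hc
          exact hb ((pvBlk_eq_iff l N _ _).2 fun i hi => hc i hi)
        obtain ⟨i, hi, hne⟩ := hex
        have hne' : l[(N * t + k) + i]? ≠ l[((N * t + k) + i) + N]? := by
          intro h; apply hne; rw [h]; congr 1; omega
        have := pvRun_reset l N ((N * t + k) + i) hne' (N * (t + 1) + k) (by omega)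
        have hlt : pvRun l N (N * (t + 1) + k) < N := by omega
        rw [Nat.div_eq_of_lt hlt]
    · rw [if_neg hfit]
      simp only [pvChain]
      rw [if_neg]
      intro hb
      have hall := (pvBlk_eq_iff l N (N * (t + 1) + k) (N * t + k)).1 hb
      set p := N * (t + 1) + k with hp
      set q := N * t + k with hqd
      have hqlt : q < l.length := by omega
      have hi0 : l.length - p < N := by omega
      have := hall (l.length - p) hi0
      have hnone : l[p + (l.length - p)]? = none := List.getElem?_eq_none (by omega)
      have hsome : l[q + (l.length - p)]? ≠ none := by
        intro h
        rw [List.getElem?_eq_none_iff] at h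
        omega
      rw [hnone] at this
      exact hsome this

theorem pvBest_ge (l : List Char) (N : Nat) : ∀ m p, 1 ≤ p → p ≤ m → pvRun l N p / N ≤ pvBest l N m := by
  intro m; induction m with
  | zero => omega
  | succ m ih =>
    intro p h1 h2
    simp only [pvBest]
    rcases Nat.lt_or_ge p (m + 1) with h | h
    · exact le_trans (ih p h1 (by omega)) (le_max_left _ _)
    · have : p = m + 1 := by omega
      subst this; exact le_max_right _ _

theorem pvBest_le (l : List Char) (N : Nat) (X : Nat) :
    ∀ m, (∀ p, 1 ≤ p → p ≤ m → pvRun l N p / N ≤ X) → pvBest l N m ≤ X := by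
  intro m; induction m with
  | zero => intro _; simp [pvBest]
  | succ m ih =>
    intro h
    simp only [pvBest, max_le_iff]
    exact ⟨ih fun p h1 h2 => h p h1 (by omega), h (m + 1) (by omega) (by omega)⟩

theorem pvAmax_ge (l : List Char) (N k : Nat) : ∀ T t, 1 ≤ t → t ≤ T → pvChain l N k t ≤ pvAmax l N k T := by
  intro T; induction T with
  | zero => omega
  | succ T ih =>
    intro t h1 h2
    simp only [pvAmax]
    rcases Nat.lt_or_ge t (T + 1) with h | h
    · exact le_trans (ih t h1 (by omega)) (le_max_left _ _)
    · have : t = T + 1 := by omega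
      subst this; exact le_max_right _ _

theorem pvAmax_le (l : List Char) (N k : Nat) (X : Nat) :
    ∀ T, (∀ t, 1 ≤ t → t ≤ T → pvChain l N k t ≤ X) → pvAmax l N k T ≤ X := by
  intro T; induction T with
  | zero => intro _; simp [pvAmax]
  | succ T ih =>
    intro h
    simp only [pvAmax, max_le_iff]
    exact ⟨ih fun t h1 h2 => h t h1 (by omega), h (T + 1) (by omega) (by omega)⟩

theorem pvOut_ge (l : List Char) (N : Nat) : ∀ K k, k < K → pvAmax l N k (pvT l N) ≤ pvOut l N K := by
  intro K; induction K with
  | zero => omega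
  | succ K ih =>
    intro k hk
    simp only [pvOut]
    rcases Nat.lt_or_ge k K with h | h
    · exact le_trans (ih k h) (le_max_left _ _)
    · have : k = K := by omega
      subst this; exact le_max_right _ _

theorem pvOut_le (l : List Char) (N : Nat) (X : Nat) :
    ∀ K, (∀ k, k < K → pvAmax l N k (pvT l N) ≤ X) → pvOut l N K ≤ X := by
  intro K; induction K with
  | zero => intro _; simp [pvOut]
  | succ K ih =>
    intro h
    simp only [pvOut, max_le_iff]
    exact ⟨ih fun k hk => h k (by omega), h K (by omega)⟩

theorem pvOut_eq_pvBest (l : List Char) (N : Nat) (hN : 1 ≤ N) :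
    pvOut l N N = pvBest l N (l.length - N) := by
  apply le_antisymm
  · apply pvOut_le
    intro k hk
    apply pvAmax_le
    intro t h1 h2
    have hT : N * t < l.length := by
      unfold pvT at h2
      split at h2
      · have h3 := Nat.le_div_iff_mul_le (by omega : 0 < N) |>.1 h2
        have h4 : N * t = t * N := Nat.mul_comm _ _
        omega
      · omega
    have hge : N ≤ N * t := Nat.le_mul_of_pos_right _ (by omega)
    rw [pvChain_formula l N k hN hk t hT]
    split
    · exact pvBest_ge l N _ _ (by omega) (by omega)
    · omega
  · apply pvBest_le
    intro p h1 h2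
    rcases Nat.lt_or_ge (pvRun l N p) N with hr | hr
    · simp [Nat.div_eq_of_lt hr]
    · -- pvRun p ≥ N so p ≥ N; pick k = p % N, t = p / N
      have hpN : N ≤ p := le_trans hr (pvRun_le l N p)
      have hLp : p + N ≤ l.length := by omega
      have hk : p % N < N := Nat.mod_lt _ (by omega)
      have ht1 : 1 ≤ p / N := Nat.one_le_div_iff (by omega) |>.2 hpN
      have hpt : N * (p / N) + p % N = p := by
        have := Nat.div_add_mod p N
        omega
      have hT' : N * (p / N) < l.length := by omega
      have hch := pvChain_formula l N (p % N) hN hk (p / N) hT'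
      rw [hpt, if_pos hLp] at hch
      have hNL : N < l.length := by omega
      have htle : p / N ≤ pvT l N := by
        unfold pvT
        rw [if_pos hNL, Nat.le_div_iff_mul_le (by omega : 0 < N)]
        have := Nat.div_mul_le_self p N
        omega
      calc pvRun l N p / N = pvChain l N (p % N) (p / N) := hch.symm
        _ ≤ pvAmax l N (p % N) (pvT l N) := pvAmax_ge _ _ _ _ _ ht1 htle
        _ ≤ pvOut l N N := pvOut_ge _ _ _ _ hk

theorem portB_inv (s : String) (N : Nat) :
    ∀ m, (List.map (fun k : Nat => (k : Int)) (List.range m)).foldl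
      (fun (st : Int × Int) i =>
        if PySem.Str.pyGet? s i = PySem.Str.pyGet? s (i + (N : Int)) then
          let run := st.2 + 1
          (if PySem.Int.floordiv run (N : Int) > st.1 then PySem.Int.floordiv run (N : Int) else st.1, run)
        else (st.1, 0))
      (0, 0)
      = ((pvBest s.toList N m : Int), (pvRun s.toList N m : Int)) := by
  intro m; induction m with
  | zero => simp [pvBest, pvRun]
  | succ m ih =>
    rw [List.range_succ, List.map_append, List.foldl_append, ih]
    simp only [List.map_cons, List.map_nil, List.foldl_cons, List.foldl_nil]
    have hcast : (m : Int) + (N : Int) = ((m + N : Nat) : Int) := by push_cast; ring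
    rw [hcast]
    simp only [PySem.Str.pyGet?_natCast]
    by_cases hd : s.toList[m]? = s.toList[(m + N)]?
    · rw [if_pos hd]
      have hrun : pvRun s.toList N (m + 1) = pvRun s.toList N m + 1 := by
        simp [pvRun, hd]
      have hfd : PySem.Int.floordiv ((pvRun s.toList N m : Int) + 1) (N : Int)
          = ((pvRun s.toList N (m + 1) / N : Nat) : Int) := by
        rw [hrun]
        have : ((pvRun s.toList N m : Int) + 1) = ((pvRun s.toList N m + 1 : Nat) : Int) := by push_cast; ring
        rw [this, PySem.Int.floordiv_natCast]
      simp only [hfd]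
      have hbest : pvBest s.toList N (m + 1) = max (pvBest s.toList N m) (pvRun s.toList N (m + 1) / N) := rfl
      refine Prod.ext ?_ ?_
      · show (if ((pvRun s.toList N (m + 1) / N : Nat) : Int) > (pvBest s.toList N m : Int)
            then ((pvRun s.toList N (m + 1) / N : Nat) : Int) else (pvBest s.toList N m : Int))
            = ((pvBest s.toList N (m + 1) : Nat) : Int)
        rw [hbest]
        by_cases hab : pvBest s.toList N m < pvRun s.toList N (m + 1) / N
        · rw [if_pos (by exact_mod_cast hab), Nat.max_eq_right (le_of_lt hab)]
        · rw [if_neg (by exact_mod_cast hab), Nat.max_eq_left (by omega)]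
      · show (pvRun s.toList N m : Int) + 1 = ((pvRun s.toList N (m + 1) : Nat) : Int)
        rw [hrun]; push_cast; ring
    · rw [if_neg hd]
      have hrun : pvRun s.toList N (m + 1) = 0 := by simp [pvRun, hd]
      have hbest : pvBest s.toList N (m + 1) = pvBest s.toList N m := by
        simp [pvBest, hrun]
      simp [hrun, hbest]

theorem portB_eq (s : String) (n : Int) (hn : 1 ≤ n) :
    nrepeats_py_alt s n = (pvBest s.toList n.toNat (s.toList.length - n.toNat) : Int) := by
  obtain ⟨N, rfl⟩ : ∃ N : Nat, n = (N : Int) := ⟨n.toNat, by omega⟩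
  simp only [Int.toNat_natCast]
  unfold nrepeats_py_alt
  rw [if_neg (by omega)]
  rcases Nat.lt_or_ge N s.toList.length with h | h
  · have hlen : PySem.Str.len s - (N : Int) = ((s.toList.length - N : Nat) : Int) := by
      rw [PySem.Str.len_eq]; omega
    rw [hlen, PySem.List.pyRange_zero_natCast, portB_inv s N]
  · have hlen : PySem.Str.len s - (N : Int) ≤ 0 := by rw [PySem.Str.len_eq]; omega
    rw [PySem.List.pyRange_one_eq_nil (by omega)]
    have h0 : s.toList.length - N = 0 := by omega
    rw [h0]
    simp [pvBest]

-- A's slice at natural position q with natural width N, as a char-list block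
theorem pvSlice_blk (s : String) (N q : Nat) :
    PySem.Str.slice s (some (q : Int)) (some ((q : Int) + (N : Int))) = String.ofList (pvBlk s.toList N q) := by
  rw [← String.ofList_toList (s := PySem.Str.slice s (some (q : Int)) (some ((q : Int) + (N : Int))))]
  congr 1
  rw [PySem.Str.toList_slice, PySem.Chars.slice_eq_listSlice]
  rw [show ((q : Int) + (N : Int)) = ((q + N : Nat) : Int) by push_cast; ring]
  rw [PySem.List.slice_natCast]
  unfold pvBlk
  congr 1
  omega

theorem pvT_eq (s : String) (N : Nat) :
    (if (N : Int) < (s.toList.length : Int) then (((s.toList.length : Int) - N + N - 1) / N).toNat else 0) = pvT s.toList N := by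
  unfold pvT
  by_cases h : N < s.toList.length
  · rw [if_pos (by exact_mod_cast h), if_pos h]
    have h1 : ((s.toList.length : Int) - N + N - 1) = ((s.toList.length - 1 : Nat) : Int) := by omega
    rw [h1]
    rw [show ((N : Nat) : Int) = ((N : Nat) : Int) from rfl]
    rw [← Int.natCast_div]
    exact Int.toNat_natCast _
  · rw [if_neg (by exact_mod_cast h), if_neg h]

theorem portA_inner (s : String) (N k : Nat) (acc : Int) (hacc : 0 ≤ acc) :
    ∀ t, (List.map (fun u : Nat => ((N : Int) + (N : Int) * (u : Int))) (List.range t)).foldl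
        (fun (st : String × Int × Int) j =>
          let phase := PySem.Str.slice s (some (j + (k : Int))) (some (j + (k : Int) + (N : Int)))
          if phase = st.1 then
            let current := st.2.1 + 1
            (st.1, current, if current > st.2.2 then current else st.2.2)
          else (phase, 0, st.2.2))
        (String.ofList (pvBlk s.toList N k), 0, acc)
      = (String.ofList (pvBlk s.toList N (N * t + k)), (pvChain s.toList N k t : Int),
         max acc ((pvAmax s.toList N k t : Nat) : Int)) := by
  intro t; induction t with
  | zero => simp [pvChain, pvAmax, pvBlk, hacc]
  | succ t ih =>
    rw [List.range_succ, List.map_append, List.foldl_append, ih]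
    simp only [List.map_cons, List.map_nil, List.foldl_cons, List.foldl_nil]
    have hj : (N : Int) + (N : Int) * (t : Int) + (k : Int) = ((N * (t + 1) + k : Nat) : Int) := by push_cast; ring
    rw [hj, pvSlice_blk s N (N * (t + 1) + k)]
    by_cases hb : pvBlk s.toList N (N * (t + 1) + k) = pvBlk s.toList N (N * t + k)
    · rw [if_pos (by rw [hb])]
      have hch : pvChain s.toList N k (t + 1) = pvChain s.toList N k t + 1 := by
        simp [pvChain, hb]
      refine Prod.ext ?_ (Prod.ext ?_ ?_)
      · show String.ofList (pvBlk s.toList N (N * t + k)) = String.ofList (pvBlk s.toList N (N * (t + 1) + k))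
        rw [hb]
      · show (pvChain s.toList N k t : Int) + 1 = ((pvChain s.toList N k (t + 1) : Nat) : Int)
        rw [hch]; push_cast; ring
      · show (if (pvChain s.toList N k t : Int) + 1 > max acc ((pvAmax s.toList N k t : Nat) : Int)
            then (pvChain s.toList N k t : Int) + 1 else max acc ((pvAmax s.toList N k t : Nat) : Int))
            = max acc ((pvAmax s.toList N k (t + 1) : Nat) : Int)
        have hc1 : (pvChain s.toList N k t : Int) + 1 = ((pvChain s.toList N k (t + 1) : Nat) : Int) := by
          rw [hch]; push_cast; ring
        rw [hc1]
        have ham : pvAmax s.toList N k (t + 1) = max (pvAmax s.toList N k t) (pvChain s.toList N k (t + 1)) := rfl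
        rw [ham]
        by_cases hgt : ((pvChain s.toList N k (t + 1) : Nat) : Int) > max acc ((pvAmax s.toList N k t : Nat) : Int)
        · rw [if_pos hgt]
          have : pvAmax s.toList N k t ≤ pvChain s.toList N k (t + 1) := by
            have := le_max_right acc ((pvAmax s.toList N k t : Nat) : Int)
            have h2 : ((pvAmax s.toList N k t : Nat) : Int) < ((pvChain s.toList N k (t + 1) : Nat) : Int) := lt_of_le_of_lt this hgt
            exact_mod_cast le_of_lt h2
          rw [Nat.max_eq_right this]
          rw [max_eq_right (le_of_lt (lt_of_le_of_lt (le_max_left _ _) hgt))]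
        · rw [if_neg hgt]
          push Not at hgt
          rw [Nat.cast_max, ← max_assoc, max_eq_left hgt]
    · rw [if_neg (fun hcon => hb (by have := congrArg String.toList hcon; simpa using this))]
      have hch : pvChain s.toList N k (t + 1) = 0 := by simp [pvChain, hb]
      have ham : pvAmax s.toList N k (t + 1) = pvAmax s.toList N k t := by
        simp [pvAmax, hch]
      rw [hch, ham]
      rfl

theorem portA_eq (s : String) (n : Int) (hn : 1 ≤ n) :
    nrepeats_py s n = (pvOut s.toList n.toNat n.toNat : Int) := by
  obtain ⟨N, rfl⟩ : ∃ N : Nat, n = (N : Int) := ⟨n.toNat, by omega⟩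
  simp only [Int.toNat_natCast]
  have hN : 1 ≤ N := by exact_mod_cast hn
  unfold nrepeats_py
  simp only []
  rw [PySem.Str.len_eq, PySem.List.pyRange_zero_natCast]
  rw [PySem.List.pyRange_of_pos (N : Int) (s.toList.length : Int) (by exact_mod_cast hN)]
  rw [pvT_eq s N]
  -- outer induction
  suffices h : ∀ K, (List.map (fun k : Nat => (k : Int)) (List.range K)).foldl
      (fun max_val k =>
        ((List.map (fun u : Nat => ((N : Int) + (N : Int) * (u : Int))) (List.range (pvT s.toList N))).foldl
          (fun (st : String × Int × Int) j =>
            let phase := PySem.Str.slice s (some (j + k)) (some (j + k + (N : Int)))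
            if phase = st.1 then
              let current := st.2.1 + 1
              (st.1, current, if current > st.2.2 then current else st.2.2)
            else (phase, 0, st.2.2))
          (PySem.Str.slice s (some k) (some ((N : Int) + k)), 0, max_val)).2.2)
      0 = ((pvOut s.toList N K : Nat) : Int) by
    exact h N
  intro K; induction K with
  | zero => simp [pvOut]
  | succ K ih =>
    rw [List.range_succ, List.map_append, List.foldl_append, ih]
    simp only [List.map_cons, List.map_nil, List.foldl_cons, List.foldl_nil]
    have hsl : PySem.Str.slice s (some ((K : Nat) : Int)) (some ((N : Int) + ((K : Nat) : Int)))
        = String.ofList (pvBlk s.toList N K) := by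
      rw [show ((N : Int) + ((K : Nat) : Int)) = (((K : Nat) : Int) + (N : Int)) by ring]
      exact pvSlice_blk s N K
    rw [hsl]
    rw [portA_inner s N K ((pvOut s.toList N K : Nat) : Int) (by positivity) (pvT s.toList N)]
    show max ((pvOut s.toList N K : Nat) : Int) ((pvAmax s.toList N K (pvT s.toList N) : Nat) : Int)
        = ((pvOut s.toList N (K + 1) : Nat) : Int)
    have : pvOut s.toList N (K + 1) = max (pvOut s.toList N K) (pvAmax s.toList N K (pvT s.toList N)) := rfl
    rw [this]
    push_cast [Nat.cast_max]
    rfl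

-- ===== VERDICT (by name: the statement is the Claim_ definition above) =====
theorem nrepeats_py_spec : Claim_equal_nrepeats_py := by
  intro s n _
  unfold Spec_nrepeats_py
  by_cases hn : 1 ≤ n
  · rw [portA_eq s n hn, portB_eq s n hn,
      pvOut_eq_pvBest s.toList n.toNat (by omega)]
  · have h1 : n < 1 := by omega
    simp only [nrepeats_py, nrepeats_py_alt, if_pos h1,
      PySem.List.pyRange_one_eq_nil (by omega : n ≤ 0), List.foldl_nil]
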